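-- pv_equiv track=rewrite | github.com/deyuanyang92-dev/Temp_scripts | Mitoz-annotate/batch_mitoz.py | _split_gb_records
-- ===== SOURCE A (Python) =====
-- from typing import Dict, List, Optional, Tuple
--
-- def _split_gb_records(text: str) -> List[str]:
--     """Split a multi-record GenBank text into individual record strings.
--
--     BUG-NEW-C (v0.27): empty / whitespace-only pseudo-records that result
--     from trailing newlines after the final ``//`` terminator are now
--     filtered out, preventing phantom entries in replace_metadata_in_text
--     stats counters.
--     """
--     records: List[str] = []
--     buf: List[str] = []
--     for line in text.splitlines(keepends=True):
--         buf.append(line)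
--         if line.strip() == "//":
--             chunk = "".join(buf)
--             if chunk.strip():          # skip empty / whitespace-only chunks
--                 records.append(chunk)
--             buf = []
--     if buf:
--         chunk = "".join(buf)
--         if chunk.strip():
--             records.append(chunk)
--     return records
-- ===== SOURCE B (Python) =====
-- def _split_gb_records(text):
--     """Split a multi-record GenBank text into individual record strings.
--
--     Two-phase approach: first locate every terminator line ("//" after
--     stripping), then cut the line list at those positions and join each
--     segment, keeping only segments with non-whitespace content.
--     """
--     lines = text.splitlines(keepends=True)
--     ends = [i for i, ln in enumerate(lines) if ln.strip() == "//"]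
--     bounds = [0] + [i + 1 for i in ends]
--     if bounds[-1] != len(lines):
--         bounds.append(len(lines))
--     chunks = ["".join(lines[a:b]) for a, b in zip(bounds, bounds[1:])]
--     return [c for c in chunks if c.strip()]
-- ===== Notes on version B (the rewrite author's own statement) =====
-- stated objective: alternative
-- what changed: Replaces A's per-line buffer/flush state machine by a two-phase plan: first collect the indices of all record-terminator lines (a line that strips to the two-slash marker), then cut the line list at those boundaries (zip of adjacent cut points), join each segment and filter out whitespace-only chunks.
import Mathlib
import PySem

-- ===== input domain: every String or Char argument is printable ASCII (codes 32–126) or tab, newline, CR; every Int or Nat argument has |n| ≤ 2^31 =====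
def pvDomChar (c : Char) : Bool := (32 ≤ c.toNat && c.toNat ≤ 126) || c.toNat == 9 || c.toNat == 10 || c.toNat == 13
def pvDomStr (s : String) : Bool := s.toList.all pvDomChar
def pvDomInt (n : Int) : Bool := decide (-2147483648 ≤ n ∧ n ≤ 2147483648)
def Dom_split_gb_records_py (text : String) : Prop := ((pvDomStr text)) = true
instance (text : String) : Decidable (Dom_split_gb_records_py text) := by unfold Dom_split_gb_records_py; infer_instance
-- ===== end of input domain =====

-- B replaces A's per-line buffer/flush state machine by a two-phase plan (locate all "//"
-- terminator lines, then cut and join the line list at those positions); objective: alternative.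

-- ===== PORT A =====
-- text.splitlines(keepends=True), hand-ported; exact on Dom (there the only line
-- boundaries Python recognises are '\n', '\r' and '\r\n').
def pvSplitKeep : List Char → List (List Char)
  | [] => []
  | '\r' :: '\n' :: rest => ['\r', '\n'] :: pvSplitKeep rest
  | c :: rest =>
    if c = '\n' ∨ c = '\r' then [c] :: pvSplitKeep rest
    else
      match pvSplitKeep rest with
      | [] => [[c]]
      | l :: ls => (c :: l) :: ls

-- literal port of A: fold over the lines with state (records, buf); flush on a "//" line,
-- then flush the leftover buffer.  "".join(buf) is buf.flatten; `if chunk.strip():` is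
-- `strip chunk ≠ []`.
def split_gb_records_py (text : String) : List String :=
  let step := fun (st : List String × List (List Char)) (line : List Char) =>
    let buf := st.2 ++ [line]
    if PySem.Chars.strip line = ['/', '/'] then
      let chunk := buf.flatten
      ((if PySem.Chars.strip chunk ≠ [] then st.1 ++ [String.ofList chunk] else st.1), ([] : List (List Char)))
    else (st.1, buf)
  let st := (pvSplitKeep text.toList).foldl step ([], [])
  if st.2 ≠ [] then
    let chunk := st.2.flatten
    if PySem.Chars.strip chunk ≠ [] then st.1 ++ [String.ofList chunk] else st.1
  else st.1

-- ===== PORT B =====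
-- literal port of Source B: terminator indices via enumerate, cut points `bounds`
-- (bounds[-1] is getLastD, bounds is never empty), slices lines[a:b], join, filter.
def split_gb_records_py_alt (text : String) : List String :=
  let lines := pvSplitKeep text.toList
  let ends := (PySem.List.enumerate lines 0).filterMap
    (fun p => if PySem.Chars.strip p.2 = ['/', '/'] then some p.1 else none)
  let bounds0 := (0 : Int) :: ends.map (· + 1)
  let bounds := if bounds0.getLastD 0 ≠ (lines.length : Int)
                then bounds0 ++ [(lines.length : Int)] else bounds0
  let chunks := (bounds.zip bounds.tail).map
    (fun p => (PySem.List.slice lines (some p.1) (some p.2)).flatten)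
  (chunks.filter (fun c => PySem.Chars.strip c ≠ [])).map String.ofList

-- ===== PRECONDITION & SPEC =====
def Spec_split_gb_records_py (text : String) (out : List String) : Prop := out = split_gb_records_py_alt text
instance (text : String) (out : List String) : Decidable (Spec_split_gb_records_py text out) := by unfold Spec_split_gb_records_py; infer_instance

-- ===== CLAIM (what is proved, stated in full; the proofs are below) =====
def Claim_equal_split_gb_records_py : Prop := ∀ (text : String), Dom_split_gb_records_py text → Spec_split_gb_records_py text (split_gb_records_py text)

-- ===== LEMMAS AND PROOFS =====

-- the common record-splitting recursion both ports are reduced to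
def pvG (buf : List (List Char)) : List (List Char) → List String
  | [] => if PySem.Chars.strip buf.flatten ≠ [] then [String.ofList buf.flatten] else []
  | l :: ls =>
    if PySem.Chars.strip l = ['/', '/'] then
      (if PySem.Chars.strip (buf ++ [l]).flatten ≠ [] then [String.ofList (buf ++ [l]).flatten] else [])
        ++ pvG [] ls
    else pvG (buf ++ [l]) ls

-- A's loop state machine, named
def pvAstep (st : List String × List (List Char)) (line : List Char) : List String × List (List Char) :=
  let buf := st.2 ++ [line]
  if PySem.Chars.strip line = ['/', '/'] then
    let chunk := buf.flatten
    ((if PySem.Chars.strip chunk ≠ [] then st.1 ++ [String.ofList chunk] else st.1), ([] : List (List Char)))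
  else (st.1, buf)

def pvAflush (st : List String × List (List Char)) : List String :=
  if st.2 ≠ [] then
    let chunk := st.2.flatten
    if PySem.Chars.strip chunk ≠ [] then st.1 ++ [String.ofList chunk] else st.1
  else st.1

theorem pvA_eq (text : String) :
    split_gb_records_py text = pvAflush ((pvSplitKeep text.toList).foldl pvAstep ([], [])) := rfl

-- B's phases, named (let-free unfoldings of the port's body)
def pvE (lines : List (List Char)) : List Int :=
  (PySem.List.enumerate lines 0).filterMap
    (fun p => if PySem.Chars.strip p.2 = ['/', '/'] then some p.1 else none)

def pvBnds (lines : List (List Char)) : List Int :=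
  if ((0 : Int) :: (pvE lines).map (· + 1)).getLastD 0 ≠ (lines.length : Int)
  then ((0 : Int) :: (pvE lines).map (· + 1)) ++ [(lines.length : Int)]
  else (0 : Int) :: (pvE lines).map (· + 1)

def pvBcore (lines : List (List Char)) : List String :=
  ((((pvBnds lines).zip (pvBnds lines).tail).map
    (fun p => (PySem.List.slice lines (some p.1) (some p.2)).flatten)).filter
      (fun c => PySem.Chars.strip c ≠ [])).map String.ofList

theorem pvB_eq (text : String) :
    split_gb_records_py_alt text = pvBcore (pvSplitKeep text.toList) := rfl

-- ---- A-side: the fold with flush is pvG ----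
theorem pvA_fold (ls : List (List Char)) : ∀ (recs : List String) (buf : List (List Char)),
    pvAflush (ls.foldl pvAstep (recs, buf)) = recs ++ pvG buf ls := by
  induction ls with
  | nil =>
    intro recs buf
    cases buf with
    | nil => simp [pvAflush, pvG]; decide
    | cons b bs =>
      simp only [List.foldl_nil, pvAflush, pvG]
      split_ifs with h1 h2 <;> simp_all
  | cons l ls ih =>
    intro recs buf
    simp only [List.foldl_cons, pvAstep, pvG]
    split_ifs with h1 h2 <;> simp [ih, List.append_assoc]

-- ---- pvG absorbs a terminator-free prefix into the buffer ----
theorem pvG_absorb (pre : List (List Char)) :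
    ∀ (buf : List (List Char)) (suf : List (List Char)),
    (∀ l ∈ pre, PySem.Chars.strip l ≠ ['/', '/']) →
    pvG buf (pre ++ suf) = pvG (buf ++ pre) suf := by
  induction pre with
  | nil => intro buf suf _; simp
  | cons p pre ih =>
    intro buf suf h
    have hp : PySem.Chars.strip p ≠ ['/', '/'] := h p (by simp)
    simp only [List.cons_append, pvG, if_neg hp]
    rw [ih (buf ++ [p]) suf (fun l hl => h l (by simp [hl]))]
    simp

-- ---- B-side helper lemmas ----
theorem pvE_shift (xs : List (List Char)) : ∀ (s : Int),
    PySem.List.enumerate xs s = (PySem.List.enumerate xs 0).map (fun p => (p.1 + s, p.2)) := by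
  induction xs with
  | nil => intro s; simp [PySem.List.enumerate_nil]
  | cons x xs ih =>
    intro s
    rw [PySem.List.enumerate_cons, PySem.List.enumerate_cons]
    simp only [zero_add]
    rw [ih (s + 1), ih 1]
    simp only [List.map_cons, List.map_map, zero_add]
    refine congrArg₂ (· :: ·) rfl ?_
    apply List.map_congr_left
    intro p _
    simp only [Function.comp_apply, Prod.mk.injEq, and_true]
    ring

theorem pvE_nil_of_noterm (lines : List (List Char))
    (h : ∀ l ∈ lines, PySem.Chars.strip l ≠ ['/', '/']) : pvE lines = [] := by
  rw [pvE, List.filterMap_eq_nil_iff]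
  intro p hp
  obtain ⟨k, hk, rfl⟩ := (PySem.List.mem_enumerate_iff _ _ _).1 hp
  simp [h _ (List.getElem_mem hk)]

theorem pvE_nonneg (lines : List (List Char)) : ∀ x ∈ pvE lines, 0 ≤ x := by
  intro x hx
  rw [pvE, List.mem_filterMap] at hx
  obtain ⟨p, hp, hsome⟩ := hx
  obtain ⟨k, hk, rfl⟩ := (PySem.List.mem_enumerate_iff _ _ _).1 hp
  by_cases h : PySem.Chars.strip (lines[k]) = ['/', '/']
  · rw [if_pos h] at hsome
    have := Option.some_inj.1 hsome
    omega
  · simp [h] at hsome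

theorem pvE_decomp (pre : List (List Char)) (t : List Char) (rest : List (List Char))
    (hpre : ∀ l ∈ pre, PySem.Chars.strip l ≠ ['/', '/'])
    (ht : PySem.Chars.strip t = ['/', '/']) :
    pvE (pre ++ t :: rest) = (pre.length : Int) :: (pvE rest).map (· + ((pre.length : Int) + 1)) := by
  have h1 : pvE pre = [] := pvE_nil_of_noterm pre hpre
  rw [pvE] at h1
  rw [pvE, PySem.List.enumerate_append, List.filterMap_append, h1, List.nil_append,
      PySem.List.enumerate_cons]
  simp only [zero_add]
  rw [List.filterMap_cons]
  simp only [ht, if_true]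
  rw [pvE_shift rest ((pre.length : Int) + 1), List.filterMap_map, pvE, List.map_filterMap]
  congr 1
  congr 1
  funext p
  by_cases h : PySem.Chars.strip p.2 = ['/', '/'] <;> simp [Function.comp, h]

theorem pvBnds_head (lines : List (List Char)) : pvBnds lines = 0 :: (pvBnds lines).tail := by
  rw [pvBnds]
  split_ifs <;> simp

theorem pvBnds_nonneg (lines : List (List Char)) : ∀ x ∈ pvBnds lines, 0 ≤ x := by
  intro x hx
  have he := pvE_nonneg lines
  have hlen : (0 : Int) ≤ (lines.length : Int) := Int.natCast_nonneg _
  rw [pvBnds] at hx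
  split_ifs at hx
  · simp only [List.mem_append, List.mem_cons, List.mem_map] at hx
    rcases hx with (rfl | ⟨y, hy, rfl⟩) | (rfl | h0)
    · exact le_refl 0
    · have := he y hy; omega
    · exact hlen
    · simp at h0
  · simp only [List.mem_cons, List.mem_map] at hx
    rcases hx with rfl | ⟨y, hy, rfl⟩
    · exact le_refl 0
    · have := he y hy; omega

theorem pvBnds_decomp (pre : List (List Char)) (t : List Char) (rest : List (List Char))
    (hpre : ∀ l ∈ pre, PySem.Chars.strip l ≠ ['/', '/'])
    (ht : PySem.Chars.strip t = ['/', '/']) :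
    pvBnds (pre ++ t :: rest) = 0 :: (pvBnds rest).map (· + ((pre.length : Int) + 1)) := by
  have hE := pvE_decomp pre t rest hpre ht
  set L : Int := (pre.length : Int) with hL
  have hb0 : (0 : Int) :: (pvE (pre ++ t :: rest)).map (· + 1)
      = 0 :: ((0 : Int) :: (pvE rest).map (· + 1)).map (· + (L + 1)) := by
    rw [hE]
    simp only [List.map_cons, List.map_map, zero_add]
    refine congrArg₂ (· :: ·) rfl (congrArg₂ (· :: ·) rfl ?_)
    apply List.map_congr_left
    intro x _
    simp only [Function.comp_apply]
    ring
  have hlen : ((pre ++ t :: rest).length : Int) = (rest.length : Int) + (L + 1) := by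
    simp only [List.length_append, List.length_cons, hL]
    push_cast
    ring
  have hlast : ((0 : Int) :: ((0 : Int) :: (pvE rest).map (· + 1)).map (· + (L + 1))).getLastD 0
      = ((0 : Int) :: (pvE rest).map (· + 1)).getLastD 0 + (L + 1) := by
    rw [List.getLastD_cons, List.getLastD_eq_getLast?, List.getLast?_map,
        List.getLastD_eq_getLast?]
    cases hg : ((0 : Int) :: (pvE rest).map (· + 1)).getLast? with
    | none => simp at hg
    | some g => simp
  rw [pvBnds, pvBnds, hb0, hlast, hlen]
  by_cases hc : ((0 : Int) :: (pvE rest).map (· + 1)).getLastD 0 ≠ (rest.length : Int)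
  · rw [if_pos (by omega), if_pos hc]
    simp only [List.map_append, List.map_cons, List.map_nil, List.cons_append]
  · rw [if_neg (by omega), if_neg hc]

theorem pvBcore_nil : pvBcore [] = [] := by decide

theorem pvBcore_noterm (lines : List (List Char)) (hne : lines ≠ [])
    (h : ∀ l ∈ lines, PySem.Chars.strip l ≠ ['/', '/']) :
    pvBcore lines = if PySem.Chars.strip lines.flatten ≠ [] then [String.ofList lines.flatten] else [] := by
  have hE := pvE_nil_of_noterm lines h
  have hlen : (0 : Int) ≠ (lines.length : Int) := by
    cases lines with
    | nil => exact absurd rfl hne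
    | cons a l => simp only [List.length_cons]; push_cast; omega
  rw [pvBcore, pvBnds, hE]
  simp only [List.map_nil, List.getLastD_cons, List.getLastD_nil]
  rw [if_pos hlen]
  simp only [List.cons_append, List.nil_append, List.zip_cons_cons, List.tail_cons,
    List.zip_nil_right, List.map_cons, List.map_nil]
  rw [PySem.List.slice_zero_start, PySem.List.slice_to_natCast]
  simp only [List.take_length, List.filter_cons, List.filter_nil]
  by_cases hc : PySem.Chars.strip lines.flatten = [] <;> simp [hc]

theorem pvBcore_decomp (pre : List (List Char)) (t : List Char) (rest : List (List Char))
    (hpre : ∀ l ∈ pre, PySem.Chars.strip l ≠ ['/', '/'])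
    (ht : PySem.Chars.strip t = ['/', '/']) :
    pvBcore (pre ++ t :: rest)
      = (if PySem.Chars.strip (pre.flatten ++ t) ≠ []
          then [String.ofList (pre.flatten ++ t)] else []) ++ pvBcore rest := by
  have hB := pvBnds_decomp pre t rest hpre ht
  set Δ : Int := (pre.length : Int) + 1 with hΔ
  have htl : pvBnds rest = 0 :: (pvBnds rest).tail := pvBnds_head rest
  set tr := (pvBnds rest).tail with htr
  rw [pvBcore, hB, htl]
  simp only [List.map_cons, zero_add, List.tail_cons]
  rw [List.zip_cons_cons]
  have hzip : (Δ :: tr.map (· + Δ)).zip (tr.map (· + Δ))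
      = ((0 :: tr).zip tr).map (Prod.map (· + Δ) (· + Δ)) := by
    have h0 : (Δ :: tr.map (· + Δ)) = (0 :: tr).map (· + Δ) := by simp
    rw [h0, ← List.zip_map]
  rw [hzip]
  simp only [List.map_cons, List.map_map]
  have hfirst : (PySem.List.slice (pre ++ t :: rest) (some 0) (some Δ)).flatten
      = pre.flatten ++ t := by
    rw [PySem.List.slice_zero_start, hΔ]
    have hcast : (pre.length : Int) + 1 = ((pre.length + 1 : Nat) : Int) := by push_cast; ring
    rw [hcast, PySem.List.slice_to_natCast, List.take_append,
        List.take_of_length_le (by omega)]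
    simp
  rw [hfirst]
  have hshift : ∀ p ∈ (0 :: tr).zip tr,
      ((fun p => (PySem.List.slice (pre ++ t :: rest) (some p.1) (some p.2)).flatten)
          ∘ Prod.map (· + Δ) (· + Δ)) p
        = (PySem.List.slice rest (some p.1) (some p.2)).flatten := by
    intro p hp
    obtain ⟨a, b⟩ := p
    have hn1 : (0 : Int) ≤ a := pvBnds_nonneg rest _ (by rw [htl]; exact (List.of_mem_zip hp).1)
    have hn2 : (0 : Int) ≤ b := pvBnds_nonneg rest _
      (by rw [htl]; exact List.mem_cons_of_mem _ ((List.of_mem_zip hp).2))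
    obtain ⟨n1, rfl⟩ : ∃ n : Nat, a = (n : Int) := ⟨a.toNat, (Int.toNat_of_nonneg hn1).symm⟩
    obtain ⟨n2, rfl⟩ : ∃ n : Nat, b = (n : Int) := ⟨b.toNat, (Int.toNat_of_nonneg hn2).symm⟩
    simp only [Function.comp_apply, Prod.map]
    have c1 : (n1 : Int) + Δ = (((pre.length + 1) + n1 : Nat) : Int) := by rw [hΔ]; push_cast; ring
    have c2 : (n2 : Int) + Δ = (((pre.length + 1) + n2 : Nat) : Int) := by rw [hΔ]; push_cast; ring
    rw [c1, c2, PySem.List.slice_natCast, PySem.List.slice_natCast]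
    have hdrop : (pre ++ t :: rest).drop (pre.length + 1 + n1) = rest.drop n1 := by
      have hassoc : pre ++ t :: rest = (pre ++ [t]) ++ rest := by simp
      rw [hassoc, List.drop_append, List.drop_of_length_le (by simp)]
      simp
    rw [hdrop]
    have hnat : pre.length + 1 + n2 - (pre.length + 1 + n1) = n2 - n1 := by omega
    rw [hnat]
  rw [List.map_congr_left hshift]
  by_cases hc : PySem.Chars.strip (pre.flatten ++ t) = [] <;>
    (simp [hc, pvBcore]
     rw [htr, ← pvBnds_head rest])

-- decidable line predicate for the takeWhile/dropWhile split
def pvNT (l : List Char) : Bool := !(PySem.Chars.strip l == ['/', '/'])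

theorem pvNT_iff (l : List Char) : pvNT l = true ↔ PySem.Chars.strip l ≠ ['/', '/'] := by
  simp [pvNT]

-- ---- the main bridge ----
theorem pvBcore_eq_pvG (lines : List (List Char)) : pvBcore lines = pvG [] lines := by
  induction hn : lines.length using Nat.strong_induction_on generalizing lines with
  | _ n ih =>
  have hsplit : lines.takeWhile pvNT ++ lines.dropWhile pvNT = lines := List.takeWhile_append_dropWhile
  have hpre : ∀ l ∈ lines.takeWhile pvNT, PySem.Chars.strip l ≠ ['/', '/'] := by
    intro l hl
    exact (pvNT_iff l).1 (List.mem_takeWhile_imp hl)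
  cases hd : lines.dropWhile pvNT with
  | nil =>
    have hall : ∀ l ∈ lines, PySem.Chars.strip l ≠ ['/', '/'] := by
      intro l hl
      apply hpre
      rw [← hsplit, hd] at hl
      simpa using hl
    cases hlnil : lines with
    | nil => rw [pvBcore_nil]; decide
    | cons a ls =>
      rw [← hlnil]
      rw [pvBcore_noterm lines (by rw [hlnil]; simp) hall]
      have habs := pvG_absorb lines [] [] (by simpa using hall)
      simp only [List.append_nil] at habs
      rw [habs]
      simp [pvG]
  | cons t rest =>
    have ht : PySem.Chars.strip t = ['/', '/'] := by
      have h2 := List.head?_dropWhile_not pvNT lines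
      rw [hd] at h2
      simp only [List.head?_cons] at h2
      simpa [pvNT] using h2
    have hlines : lines = lines.takeWhile pvNT ++ t :: rest := by
      conv_lhs => rw [← hsplit]
      rw [hd]
    have hlt : rest.length < n := by
      rw [← hn]
      conv_rhs => rw [hlines]
      simp only [List.length_append, List.length_cons]
      omega
    rw [hlines, pvBcore_decomp _ t rest hpre ht, ih rest.length hlt rest rfl]
    have habs := pvG_absorb (lines.takeWhile pvNT) [] (t :: rest) hpre
    rw [habs]
    simp only [List.nil_append, pvG, if_pos ht]
    have hfl : ((lines.takeWhile pvNT) ++ [t]).flatten = (lines.takeWhile pvNT).flatten ++ t := by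
      simp
    rw [hfl]

-- ===== VERDICT (by name: the statement is the Claim_ definition above) =====
theorem split_gb_records_py_spec : Claim_equal_split_gb_records_py := by
  intro text _
  unfold Spec_split_gb_records_py
  rw [pvA_eq, pvB_eq, pvA_fold, pvBcore_eq_pvG]
  simp
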